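-- pv_equiv track=rewrite | github.com/DanRepik/simple_oauth_server | simple_oauth_server/utils/authz_db.py | _prepare_sql
-- ===== SOURCE A (Python) =====
-- from typing import Any, Dict, List, Optional, Tuple
--
-- def _prepare_sql(
--     sql: str, sub: str, tenant: Optional[str]
-- ) -> Tuple[str, Tuple[Any, ...]]:
--     """
--     Support a simple named parameter style with :sub and :tenant and
--     convert to %s placeholders.
--     If a name is absent, it is not included in the param tuple.
--     """
--     if sql is None:
--         return "", tuple()
--     params: List[Any] = []
--     ordered: List[str] = []
--     # Determine order by appearance
--     idx_sub = sql.find(":sub")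
--     idx_tenant = sql.find(":tenant")
--     for name, idx in sorted(
--         [(":sub", idx_sub), (":tenant", idx_tenant)],
--         key=lambda x: (x[1] if x[1] >= 0 else 10**9),
--     ):
--         if idx >= 0:
--             ordered.append(name)
--     for name in ordered:
--         if name == ":sub":
--             params.append(sub)
--         elif name == ":tenant":
--             params.append(tenant)
--     sql_prepared = sql.replace(":sub", "%s").replace(":tenant", "%s")
--     return sql_prepared, tuple(params)
-- ===== SOURCE B (Python) =====
-- def _prepare_sql(sql, sub, tenant):
--     if sql is None:
--         return "", tuple()
--     out = []
--     params = []
--     seen_sub = False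
--     seen_tenant = False
--     i = 0
--     n = len(sql)
--     while i < n:
--         if sql.startswith(":tenant", i):
--             out.append("%s")
--             if not seen_tenant:
--                 params.append(tenant)
--                 seen_tenant = True
--             i += 7
--         elif sql.startswith(":sub", i):
--             out.append("%s")
--             if not seen_sub:
--                 params.append(sub)
--                 seen_sub = True
--             i += 4
--         else:
--             out.append(sql[i])
--             i += 1
--     return "".join(out), tuple(params)
-- ===== Notes on version B (the rewrite author's own statement) =====
-- stated objective: alternative
-- what changed: Replaced A's find/sorted-ordering/double str.replace pipeline with a single left-to-right scan that emits %s for each placeholder and appends each parameter the first time its name is encountered, guarded by seen flags.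
import Mathlib
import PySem

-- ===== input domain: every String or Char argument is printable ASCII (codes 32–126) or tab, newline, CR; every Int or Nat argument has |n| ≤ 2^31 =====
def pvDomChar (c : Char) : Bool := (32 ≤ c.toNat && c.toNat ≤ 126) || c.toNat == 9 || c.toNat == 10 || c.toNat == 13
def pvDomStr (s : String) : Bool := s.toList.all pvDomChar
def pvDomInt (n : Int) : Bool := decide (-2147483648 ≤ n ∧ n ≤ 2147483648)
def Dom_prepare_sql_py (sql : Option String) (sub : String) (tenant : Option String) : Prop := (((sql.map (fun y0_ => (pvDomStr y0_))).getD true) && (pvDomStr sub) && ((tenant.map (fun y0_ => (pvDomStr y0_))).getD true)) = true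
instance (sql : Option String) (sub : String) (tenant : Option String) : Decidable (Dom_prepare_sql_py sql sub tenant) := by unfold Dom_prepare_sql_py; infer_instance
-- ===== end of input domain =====

-- B replaces A's find/sorted/double-replace pipeline by a single left-to-right scan that emits "%s"
-- and collects the parameters in first-appearance order (an alternative decomposition of the same task).

-- ===== PORT A =====
def prepare_sql_py (sql : Option String) (sub : String) (tenant : Option String) : String × List (Option String) :=
  match sql with
  | none => ("", [])
  | some s =>
    let idx_sub : Int := PySem.Str.find s ":sub"
    let idx_tenant : Int := PySem.Str.find s ":tenant"
    let ordered : List String :=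
      (PySem.List.sorted [((":sub" : String), idx_sub), ((":tenant" : String), idx_tenant)]
          (fun x => if x.2 ≥ 0 then x.2 else 10 ^ 9)).foldl
        (fun acc ni => if ni.2 ≥ 0 then acc ++ [ni.1] else acc) []
    let params : List (Option String) :=
      ordered.foldl (fun acc name =>
        if name = ":sub" then acc ++ [some sub]
        else if name = ":tenant" then acc ++ [tenant] else acc) []
    let sql_prepared := PySem.Str.replace (PySem.Str.replace s ":sub" "%s") ":tenant" "%s"
    (sql_prepared, params)

-- ===== PORT B =====
-- the while loop of Source B: scan the remaining characters once, emit "%s" for each placeholder hit,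
-- record a parameter the first time each name is seen (startswith at i = isPrefixOf on the suffix)
def pvScanB (sub : String) (tenant : Option String) : List Char → Bool → Bool → List Char × List (Option String)
  | [], _, _ => ([], [])
  | c :: rest, seenS, seenT =>
    if (":tenant".toList).isPrefixOf (c :: rest) then
      let r := pvScanB sub tenant (rest.drop 6) seenS true
      ('%' :: 's' :: r.1, if seenT then r.2 else tenant :: r.2)
    else if (":sub".toList).isPrefixOf (c :: rest) then
      let r := pvScanB sub tenant (rest.drop 3) true seenT
      ('%' :: 's' :: r.1, if seenS then r.2 else some sub :: r.2)
    else
      let r := pvScanB sub tenant rest seenS seenT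
      (c :: r.1, r.2)
termination_by l _ _ => l.length
decreasing_by all_goals (simp; try omega)

def prepare_sql_py_alt (sql : Option String) (sub : String) (tenant : Option String) : String × List (Option String) :=
  match sql with
  | none => ("", [])
  | some s =>
    let r := pvScanB sub tenant s.toList false false
    (String.ofList r.1, r.2)

-- ===== PRECONDITION & SPEC =====
def Spec_prepare_sql_py (sql : Option String) (sub : String) (tenant : Option String) (out : String × List (Option String)) : Prop := out = prepare_sql_py_alt sql sub tenant
instance (sql : Option String) (sub : String) (tenant : Option String) (out : String × List (Option String)) : Decidable (Spec_prepare_sql_py sql sub tenant out) := by unfold Spec_prepare_sql_py; infer_instance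

-- ===== CLAIM (what is proved, stated in full; the proofs are below) =====
def Claim_equal_prepare_sql_py : Prop := ∀ (sql : Option String) (sub : String) (tenant : Option String), Dom_prepare_sql_py sql sub tenant → Spec_prepare_sql_py sql sub tenant (prepare_sql_py sql sub tenant)

-- ===== LEMMAS AND PROOFS =====

-- simple recursive form of Python's str.replace for a nonempty pattern
def pvRepl (old new : List Char) : List Char → List Char
  | [] => []
  | c :: t =>
    if old.isPrefixOf (c :: t) then new ++ pvRepl old new (t.drop (old.length - 1))
    else c :: pvRepl old new t
termination_by l => l.length
decreasing_by all_goals (simp; try omega)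

lemma pvRepl_cons_neg (old new : List Char) (c : Char) (t : List Char)
    (h : old.isPrefixOf (c :: t) = false) :
    pvRepl old new (c :: t) = c :: pvRepl old new t := by
  rw [pvRepl, if_neg (by simp [h])]

lemma pvRepl_go (old new : List Char) (hold : old ≠ []) :
    ∀ (n : Nat) (l acc : List Char), l.length ≤ n →
      PySem.Chars.replace.go old new n l acc = acc.reverse ++ pvRepl old new l := by
  intro n
  induction n with
  | zero =>
    intro l acc hl
    have : l = [] := by cases l <;> simp_all
    subst this
    rw [PySem.Chars.replace.go]
    simp [pvRepl]
  | succ n ih =>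
    intro l acc hl
    cases l with
    | nil => rw [PySem.Chars.replace.go]; simp [pvRepl]; omega
    | cons c t =>
      rw [PySem.Chars.replace.go]
      by_cases hp : old.isPrefixOf (c :: t) = true
      · have hlen : 1 ≤ old.length := by cases old <;> simp_all
        have hdrop : (c :: t).drop old.length = t.drop (old.length - 1) := by
          cases old with
          | nil => simp_all
          | cons o os => simp
        rw [hp]
        simp only [if_true]
        rw [ih ((c :: t).drop old.length) (new.reverse ++ acc)
          (by rw [List.length_drop]; simp only [List.length_cons] at hl ⊢; omega)]
        simp [pvRepl, hp, hdrop]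
      · simp only [hp]
        rw [ih t (c :: acc) (by simp only [List.length_cons] at hl; omega)]
        simp [pvRepl, hp]

lemma pvRepl_eq_replace (old new l : List Char) (hold : old ≠ []) :
    PySem.Chars.replace l old new = pvRepl old new l := by
  rw [PySem.Chars.replace]
  have : old.isEmpty = false := by cases old <;> simp_all
  rw [this]
  simpa using pvRepl_go old new hold l.length l [] le_rfl

-- find.go with start k, expressed through the start-0 value
lemma pvFind_go_shift (sub : List Char) (hsub : sub ≠ []) :
    ∀ (l : List Char) (k : Nat),
      PySem.Chars.find.go sub l k =
        if PySem.Chars.find.go sub l 0 = -1 then -1 else PySem.Chars.find.go sub l 0 + k := by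
  intro l
  induction l with
  | nil =>
    intro k
    rw [PySem.Chars.find.go, PySem.Chars.find.go]
    have : sub.isEmpty = false := by cases sub <;> simp_all
    simp [this]
  | cons c t ih =>
    intro k
    rw [PySem.Chars.find.go]
    conv_rhs => rw [PySem.Chars.find.go]
    by_cases hp : sub.isPrefixOf (c :: t) = true
    · simp [hp]
    · simp only [hp, if_false, Bool.false_eq_true]
      rw [ih (0 + 1), ih (k + 1)]
      have hge : -1 ≤ PySem.Chars.find.go sub t 0 := by
        have := PySem.Chars.neg_one_le_find t sub
        rw [PySem.Chars.find] at this
        exact this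
      push_cast
      split_ifs <;> omega

lemma pvFind_cons (sub : List Char) (c : Char) (t : List Char) (hsub : sub ≠ [])
    (hp : sub.isPrefixOf (c :: t) = false) :
    PySem.Chars.find (c :: t) sub =
      if PySem.Chars.find t sub = -1 then -1 else PySem.Chars.find t sub + 1 := by
  rw [PySem.Chars.find, PySem.Chars.find.go, hp]
  simp only [Bool.false_eq_true, if_false]
  rw [pvFind_go_shift sub hsub t 1, PySem.Chars.find]
  norm_num

lemma pvFind_cons_prefix (sub : List Char) (c : Char) (t : List Char)
    (hp : sub.isPrefixOf (c :: t) = true) :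
    PySem.Chars.find (c :: t) sub = 0 := by
  rw [PySem.Chars.find, PySem.Chars.find.go, hp]
  simp

lemma pvFind_nil (sub : List Char) (hsub : sub ≠ []) : PySem.Chars.find [] sub = -1 := by
  rw [PySem.Chars.find, PySem.Chars.find.go]
  have : sub.isEmpty = false := by cases sub <;> simp_all
  simp [this]

-- find ":sub" through a leading ":tenant" block (no ":sub" occurrence can start inside it)
lemma pvFind_sub_after_tenant (r : List Char) :
    PySem.Chars.find (":tenant".toList ++ r) ":sub".toList =
      if PySem.Chars.find r ":sub".toList = -1 then -1
      else PySem.Chars.find r ":sub".toList + 7 := by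
  have hne : (":sub".toList : List Char) ≠ [] := by decide
  have hge : -1 ≤ PySem.Chars.find r ":sub".toList := PySem.Chars.neg_one_le_find r _
  show PySem.Chars.find (':' :: 't' :: 'e' :: 'n' :: 'a' :: 'n' :: 't' :: r) ":sub".toList = _
  rw [pvFind_cons _ _ _ hne (by cases r <;> simp [List.isPrefixOf])]
  rw [pvFind_cons _ _ _ hne (by cases r <;> simp [List.isPrefixOf])]
  rw [pvFind_cons _ _ _ hne (by cases r <;> simp [List.isPrefixOf])]
  rw [pvFind_cons _ _ _ hne (by cases r <;> simp [List.isPrefixOf])]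
  rw [pvFind_cons _ _ _ hne (by cases r <;> simp [List.isPrefixOf])]
  rw [pvFind_cons _ _ _ hne (by cases r <;> simp [List.isPrefixOf])]
  rw [pvFind_cons _ _ _ hne (by cases r <;> simp [List.isPrefixOf])]
  split_ifs <;> omega

-- find ":tenant" through a leading ":sub" block
lemma pvFind_tenant_after_sub (r : List Char) :
    PySem.Chars.find (":sub".toList ++ r) ":tenant".toList =
      if PySem.Chars.find r ":tenant".toList = -1 then -1
      else PySem.Chars.find r ":tenant".toList + 4 := by
  have hne : (":tenant".toList : List Char) ≠ [] := by decide
  have hge : -1 ≤ PySem.Chars.find r ":tenant".toList := PySem.Chars.neg_one_le_find r _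
  show PySem.Chars.find (':' :: 's' :: 'u' :: 'b' :: r) ":tenant".toList = _
  rw [pvFind_cons _ _ _ hne (by cases r <;> simp [List.isPrefixOf])]
  rw [pvFind_cons _ _ _ hne (by cases r <;> simp [List.isPrefixOf])]
  rw [pvFind_cons _ _ _ hne (by cases r <;> simp [List.isPrefixOf])]
  rw [pvFind_cons _ _ _ hne (by cases r <;> simp [List.isPrefixOf])]
  split_ifs <;> omega

-- A's parameter tuple as a closed form of the two find results
def pvParams (sub : String) (tenant : Option String) (isub iten : Int) : List (Option String) :=
  if 0 ≤ isub then
    if 0 ≤ iten then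
      if iten < isub then [tenant, some sub] else [some sub, tenant]
    else [some sub]
  else if 0 ≤ iten then [tenant] else []

-- the same under the scanner's two "seen" flags
def pvPar (sub : String) (tenant : Option String) (isub iten : Int) : Bool → Bool → List (Option String)
  | true, true => []
  | true, false => if 0 ≤ iten then [tenant] else []
  | false, true => if 0 ≤ isub then [some sub] else []
  | false, false => pvParams sub tenant isub iten

-- A's sorted-then-fold parameter pipeline equals the closed form
lemma pvParamsA_eq (sub : String) (tenant : Option String) (isub iten : Int)
    (hs : -1 ≤ isub) (ht : -1 ≤ iten) :
    (((PySem.List.sorted [((":sub" : String), isub), ((":tenant" : String), iten)]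
          (fun x => if x.2 ≥ 0 then x.2 else 10 ^ 9)).foldl
        (fun acc ni => if ni.2 ≥ 0 then acc ++ [ni.1] else acc) []).foldl
      (fun acc name =>
        if name = ":sub" then acc ++ [some sub]
        else if name = ":tenant" then acc ++ [tenant] else acc) []) =
    pvParams sub tenant isub iten := by
  simp only [PySem.List.sorted, List.foldl, PySem.List.insertBy, pvParams]
  split_ifs <;> simp_all [List.foldl] <;> split_ifs <;> simp_all [List.foldl] <;> try omega

-- a ":"-free, "%"-free word is a prefix of the ":sub"→"%s" rewrite of t iff it is a prefix of t
lemma pvPfx (w : List Char) (hw : ∀ c ∈ w, c ≠ ':' ∧ c ≠ '%') :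
    ∀ t : List Char,
      w.isPrefixOf (pvRepl ":sub".toList "%s".toList t) = w.isPrefixOf t := by
  induction w with
  | nil => intro t; simp [List.isPrefixOf]
  | cons a w ih =>
    intro t
    cases t with
    | nil => simp [pvRepl, List.isPrefixOf]
    | cons c t' =>
      have ha := hw a (by simp)
      by_cases hp : (":sub".toList).isPrefixOf (c :: t') = true
      · have hc : c = ':' := by
          simp [List.isPrefixOf] at hp
          exact hp.1.symm
        rw [pvRepl, if_pos hp]
        show (a :: w).isPrefixOf ('%' :: 's' :: _) = _
        have h1 : (a == '%') = false := beq_eq_false_iff_ne.mpr ha.2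
        have h2 : (a == ':') = false := beq_eq_false_iff_ne.mpr ha.1
        simp [List.isPrefixOf, hc, h1, h2]
      · rw [pvRepl, if_neg hp]
        simp only [List.isPrefixOf]
        rw [ih (fun c hc => hw c (by simp [hc])) t']

-- the scanner's emitted characters are exactly A's two successive replaces
lemma pvScanB_fst (sub : String) (tenant : Option String) :
    ∀ (cs : List Char) (s t : Bool),
      (pvScanB sub tenant cs s t).1 =
        pvRepl ":tenant".toList "%s".toList (pvRepl ":sub".toList "%s".toList cs) := by
  intro cs s t
  induction cs, s, t using pvScanB.induct sub tenant with
  | case1 s t => simp [pvScanB, pvRepl]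
  | case2 c rest s t hT ih =>
    obtain ⟨r, hr⟩ := (PySem.Chars.startswith_iff (c :: rest) ":tenant".toList).mp hT
    have h2 : (':' :: 't' :: 'e' :: 'n' :: 'a' :: 'n' :: 't' :: r : List Char) = c :: rest := by
      simpa using hr
    have hc : c = ':' := (List.cons_eq_cons.mp h2).1.symm
    have hrest : rest = 't' :: 'e' :: 'n' :: 'a' :: 'n' :: 't' :: r := (List.cons_eq_cons.mp h2).2.symm
    subst hc; subst hrest
    simp only [List.drop_succ_cons, List.drop_zero] at ih
    rw [pvScanB, if_pos hT]
    simp only [List.drop_succ_cons, List.drop_zero]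
    rw [ih]
    simp [pvRepl, List.isPrefixOf]
  | case3 c rest s t hT hS ih =>
    obtain ⟨r, hr⟩ := (PySem.Chars.startswith_iff (c :: rest) ":sub".toList).mp hS
    have h2 : (':' :: 's' :: 'u' :: 'b' :: r : List Char) = c :: rest := by simpa using hr
    have hc : c = ':' := (List.cons_eq_cons.mp h2).1.symm
    have hrest : rest = 's' :: 'u' :: 'b' :: r := (List.cons_eq_cons.mp h2).2.symm
    subst hc; subst hrest
    simp only [List.drop_succ_cons, List.drop_zero] at ih
    rw [pvScanB, if_neg hT, if_pos hS]
    simp only [List.drop_succ_cons, List.drop_zero]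
    rw [ih]
    simp [pvRepl, List.isPrefixOf]
  | case4 c rest s t hT hS ih =>
    rw [pvScanB, if_neg hT, if_neg hS]
    rw [pvRepl_cons_neg _ _ _ _ (Bool.eq_false_iff.mpr hS)]
    by_cases hc : c = ':'
    · subst hc
      have hT' : (['t', 'e', 'n', 'a', 'n', 't'] : List Char).isPrefixOf rest = false := by
        by_contra hx
        apply hT
        show (':' :: ['t', 'e', 'n', 'a', 'n', 't']).isPrefixOf (':' :: rest) = true
        simp only [List.isPrefixOf, beq_self_eq_true, Bool.true_and]
        simpa using hx
      have hcond : (":tenant".toList).isPrefixOf (':' :: pvRepl ":sub".toList "%s".toList rest) = false := by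
        show (':' :: ['t', 'e', 'n', 'a', 'n', 't']).isPrefixOf _ = false
        simp only [List.isPrefixOf, beq_self_eq_true, Bool.true_and]
        have hw : ∀ x ∈ (['t', 'e', 'n', 'a', 'n', 't'] : List Char), x ≠ ':' ∧ x ≠ '%' := by
          intro x hx; fin_cases hx <;> exact ⟨by decide, by decide⟩
        rw [pvPfx ['t', 'e', 'n', 'a', 'n', 't'] hw rest, hT']
      rw [pvRepl_cons_neg _ _ _ _ hcond]
      simp [ih]
    · have hcond : (":tenant".toList).isPrefixOf (c :: pvRepl ":sub".toList "%s".toList rest) = false := by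
        show (':' :: ['t', 'e', 'n', 'a', 'n', 't']).isPrefixOf _ = false
        have h1 : (':' == c) = false := beq_eq_false_iff_ne.mpr (fun h => hc h.symm)
        simp [List.isPrefixOf, h1]
      rw [pvRepl_cons_neg _ _ _ _ hcond]
      simp [ih]

-- the scanner's collected parameters are A's closed form of the two finds
lemma pvScanB_snd (sub : String) (tenant : Option String) :
    ∀ (cs : List Char) (s t : Bool),
      (pvScanB sub tenant cs s t).2 =
        pvPar sub tenant (PySem.Chars.find cs ":sub".toList)
          (PySem.Chars.find cs ":tenant".toList) s t := by
  intro cs s t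
  induction cs, s, t using pvScanB.induct sub tenant with
  | case1 s t =>
    rw [pvFind_nil _ (by decide), pvFind_nil _ (by decide)]
    rcases s <;> rcases t <;> simp [pvScanB, pvPar, pvParams]
  | case2 c rest s t hT ih =>
    obtain ⟨r, hr⟩ := (PySem.Chars.startswith_iff (c :: rest) ":tenant".toList).mp hT
    have h2 : (':' :: 't' :: 'e' :: 'n' :: 'a' :: 'n' :: 't' :: r : List Char) = c :: rest := by
      simpa using hr
    have hc : c = ':' := (List.cons_eq_cons.mp h2).1.symm
    have hrest : rest = 't' :: 'e' :: 'n' :: 'a' :: 'n' :: 't' :: r := (List.cons_eq_cons.mp h2).2.symm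
    subst hc; subst hrest
    simp only [List.drop_succ_cons, List.drop_zero] at ih
    rw [pvScanB, if_pos hT]
    simp only [List.drop_succ_cons, List.drop_zero]
    rw [pvFind_cons_prefix _ _ _ hT]
    rw [show (':' :: 't' :: 'e' :: 'n' :: 'a' :: 'n' :: 't' :: r : List Char) = ":tenant".toList ++ r from by simp]
    rw [pvFind_sub_after_tenant r]
    have hge : -1 ≤ PySem.Chars.find r ":sub".toList := PySem.Chars.neg_one_le_find r _
    rw [ih]
    rcases s <;> rcases t <;>
      simp only [pvPar, pvParams, if_true] <;>
      split_ifs <;> first | rfl | omega | exact (‹False›).elim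
  | case3 c rest s t hT hS ih =>
    obtain ⟨r, hr⟩ := (PySem.Chars.startswith_iff (c :: rest) ":sub".toList).mp hS
    have h2 : (':' :: 's' :: 'u' :: 'b' :: r : List Char) = c :: rest := by simpa using hr
    have hc : c = ':' := (List.cons_eq_cons.mp h2).1.symm
    have hrest : rest = 's' :: 'u' :: 'b' :: r := (List.cons_eq_cons.mp h2).2.symm
    subst hc; subst hrest
    simp only [List.drop_succ_cons, List.drop_zero] at ih
    rw [pvScanB, if_neg hT, if_pos hS]
    simp only [List.drop_succ_cons, List.drop_zero]
    rw [pvFind_cons_prefix _ _ _ hS]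
    rw [show (':' :: 's' :: 'u' :: 'b' :: r : List Char) = ":sub".toList ++ r from by simp]
    rw [pvFind_tenant_after_sub r]
    have hge : -1 ≤ PySem.Chars.find r ":tenant".toList := PySem.Chars.neg_one_le_find r _
    rw [ih]
    rcases s <;> rcases t <;>
      simp only [pvPar, pvParams, if_true] <;>
      split_ifs <;> first | rfl | omega | exact (‹False›).elim
  | case4 c rest s t hT hS ih =>
    rw [pvScanB, if_neg hT, if_neg hS]
    rw [pvFind_cons _ c rest (by decide) (Bool.eq_false_iff.mpr hS)]
    rw [pvFind_cons _ c rest (by decide) (Bool.eq_false_iff.mpr hT)]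
    have hgs : -1 ≤ PySem.Chars.find rest ":sub".toList := PySem.Chars.neg_one_le_find rest _
    have hgt : -1 ≤ PySem.Chars.find rest ":tenant".toList := PySem.Chars.neg_one_le_find rest _
    rw [ih]
    rcases s <;> rcases t <;>
      simp only [pvPar, pvParams] <;>
      split_ifs <;> first | rfl | omega

-- ===== VERDICT (by name: the statement is the Claim_ definition above) =====
theorem prepare_sql_py_spec : Claim_equal_prepare_sql_py := by
  intro sql sub tenant _dom
  unfold Spec_prepare_sql_py
  cases sql with
  | none => rfl
  | some s =>
    have hs : -1 ≤ PySem.Chars.find s.toList ":sub".toList := PySem.Chars.neg_one_le_find _ _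
    have ht : -1 ≤ PySem.Chars.find s.toList ":tenant".toList := PySem.Chars.neg_one_le_find _ _
    simp only [prepare_sql_py, prepare_sql_py_alt, PySem.Str.find_eq]
    rw [pvParamsA_eq sub tenant _ _ hs ht]
    rw [pvScanB_fst sub tenant s.toList false false, pvScanB_snd sub tenant s.toList false false]
    refine Prod.ext ?_ ?_
    · apply String.toList_inj.mp
      simp only [PySem.Str.toList_replace]
      rw [pvRepl_eq_replace _ _ _ (by decide)]
      rw [pvRepl_eq_replace _ _ _ (by decide)]
      simp
    · simp [pvPar]
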